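-- pv_equiv track=rewrite | github.com/Jeonghoon2/Coding-once-a-day | 프로그래머스/[PCCP 모의고사]/[PCCP 모의고사 #1] 외톨이 알파벳.py | solution
-- ===== SOURCE A (Python) =====
-- def solution(input_string):
--     answer = ''
--     alone_char = set()
--     regi_char = dict()
--
--     for r, char in enumerate(input_string):
--
--         # char가 등록 되지 않은 경우
--         if char not in regi_char:
--             regi_char[char] = r
--         else:
--             # char가 등록 되어 있지만 r-1이 같은 char인 경우
--             if input_string[r - 1] == char:
--                 pass
--             else:
--                 alone_char.add(char)
--
--     if len(alone_char) == 0: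
--         return 'N'
--     else:
--         alone_char = list(alone_char)
--         alone_char.sort()
--         for i in alone_char:
--             answer+=i
--     return answer
-- ===== SOURCE B (Python) =====
-- def solution(input_string):
--     # run-length compress into the sequence of run keys
--     keys = []
--     prev = None
--     for c in input_string:
--         if c != prev:
--             keys.append(c)
--             prev = c
--     # count runs per character
--     runs = {}
--     for c in keys:
--         runs[c] = runs.get(c, 0) + 1
--     alone = sorted(c for c in runs if runs[c] > 1)
--     return ''.join(alone) if alone else 'N'
-- ===== Notes on version B (the rewrite author's own statement) =====
-- stated objective: alternative
-- what changed: Instead of scanning positions with a first-index dict and a previous-index string comparison, B run-length compresses the string into its sequence of run keys, counts runs per character with a dict, and returns the sorted characters with more than one run.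
import Mathlib
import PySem

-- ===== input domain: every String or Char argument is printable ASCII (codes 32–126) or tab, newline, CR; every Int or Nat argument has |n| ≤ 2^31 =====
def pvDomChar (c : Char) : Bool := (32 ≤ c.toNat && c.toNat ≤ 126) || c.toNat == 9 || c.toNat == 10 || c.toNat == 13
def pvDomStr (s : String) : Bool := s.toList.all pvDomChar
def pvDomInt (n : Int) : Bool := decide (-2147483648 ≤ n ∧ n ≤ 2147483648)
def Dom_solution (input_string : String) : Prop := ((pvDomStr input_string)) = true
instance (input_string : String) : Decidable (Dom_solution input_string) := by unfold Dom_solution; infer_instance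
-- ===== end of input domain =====

-- B replaces A's first-index dict + previous-index comparison by run-length compression
-- and a per-character run counter (objective: alternative algorithm, same cost).
-- Strings are modelled as List Char; equivalence is about the return value.

-- ===== PORT A =====
-- the 'for r, char in enumerate(input_string)' loop, state (alone_char, regi_char)
def solutionLoop (cs : List Char) (r : Nat) :
    List Char → PySem.Set Char × PySem.Dict Char Int → PySem.Set Char × PySem.Dict Char Int
  | [], st => st
  | c :: t, st =>
    if !(st.2.contains c) then
      solutionLoop cs (r+1) t (st.1, st.2.insert c (r : Int))
    else if PySem.List.pyGet? cs ((r : Int) - 1) = some c then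
      solutionLoop cs (r+1) t st
    else
      solutionLoop cs (r+1) t (PySem.Set.add st.1 c, st.2)

def solution (input_string : String) : String :=
  let cs := input_string.toList
  let st := solutionLoop cs 0 cs (PySem.Set.empty, PySem.Dict.empty)
  if st.1.length = 0 then "N"
  else
    -- answer += i over the sorted list
    String.mk ((PySem.List.sorted st.1 (fun x => x) false).foldl (fun acc c => acc ++ [c]) [])

-- ===== PORT B =====
def solution_alt (input_string : String) : String :=
  let cs := input_string.toList
  -- run-length compress: keys of consecutive runs, with a 'prev' variable
  let keys := (cs.foldl
      (fun (st : List Char × Option Char) c =>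
        if some c ≠ st.2 then (st.1 ++ [c], some c) else st) ([], none)).1
  -- runs[c] = runs.get(c, 0) + 1
  let runs := keys.foldl (fun (d : PySem.Dict Char Int) c => d.modify c 0 (· + 1)) PySem.Dict.empty
  let alone := PySem.List.sorted ((PySem.Dict.keys runs).filter (fun c => decide (1 < runs.getD c 0))) (fun x => x) false
  if alone = [] then "N" else String.mk alone

-- ===== PRECONDITION & SPEC =====
def Spec_solution (input_string : String) (out : String) : Prop := out = solution_alt input_string
instance (input_string : String) (out : String) : Decidable (Spec_solution input_string out) := by unfold Spec_solution; infer_instance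

-- ===== CLAIM (what is proved, stated in full; the proofs are below) =====
def Claim_equal_solution : Prop := ∀ (input_string : String), Dom_solution input_string → Spec_solution input_string (solution input_string)

-- ===== LEMMAS AND PROOFS =====

-- run keys of the remaining characters, given the previous character
def runKeys : Option Char → List Char → List Char
  | _, [] => []
  | prev, c :: t => if some c = prev then runKeys prev t else c :: runKeys (some c) t

-- mathematical form of the per-run seen/alone processing
def bFold : List Char → PySem.Set Char → PySem.Set Char → PySem.Set Char × PySem.Set Char
  | [], seen, alone => (seen, alone)
  | c :: t, seen, alone =>
    if seen.contains c then bFold t seen (alone.add c) else bFold t (seen.add c) alone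

theorem keysFold_eq_runKeys (l : List Char) :
    ∀ (ks : List Char) (prev : Option Char),
      (l.foldl (fun (st : List Char × Option Char) c =>
        if some c ≠ st.2 then (st.1 ++ [c], some c) else st) (ks, prev)).1
      = ks ++ runKeys prev l := by
  induction l with
  | nil => intro ks prev; simp [runKeys]
  | cons c t ih =>
    intro ks prev
    rw [List.foldl_cons]
    by_cases h : some c = prev
    · rw [show (if some c ≠ (ks, prev).2 then ((ks, prev).1 ++ [c], some c) else (ks, prev))
            = (ks, prev) from by simp [h]]
      rw [runKeys, if_pos h]
      exact ih ks prev
    · rw [show (if some c ≠ (ks, prev).2 then ((ks, prev).1 ++ [c], some c) else (ks, prev))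
            = (ks ++ [c], some c) from by simp [h]]
      rw [runKeys, if_neg h, ih]
      simp

theorem solutionLoop_eq_bFold (cs : List Char) :
    ∀ (rest : List Char) (r : Nat) (prev : Option Char)
      (alone seen : PySem.Set Char) (regi : PySem.Dict Char Int),
      rest = cs.drop r →
      ((r = 0 ∧ prev = none ∧ ∀ c, seen.contains c = false) ∨
        (0 < r ∧ PySem.List.pyGet? cs ((r : Int) - 1) = prev ∧
          ∃ p, prev = some p ∧ seen.contains p = true)) →
      (∀ c, regi.contains c = seen.contains c) →
      (solutionLoop cs r rest (alone, regi)).1 = (bFold (runKeys prev rest) seen alone).2 := by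
  intro rest
  induction rest with
  | nil => intro r prev alone seen regi _ _ _; simp [solutionLoop, runKeys, bFold]
  | cons c t ih =>
    intro r prev alone seen regi hdrop hprev hregi
    have hcs : cs[r]? = some c := by
      have h0 : (List.drop r cs)[0]? = some c := by rw [← hdrop]; rfl
      rw [List.getElem?_drop] at h0
      simpa using h0
    have hdrop' : t = cs.drop (r + 1) := by
      have h1 : (c :: t).drop 1 = (cs.drop r).drop 1 := by rw [hdrop]
      simpa [List.drop_drop, Nat.add_comm] using h1
    have hget : PySem.List.pyGet? cs ((r + 1 : Nat) - 1 : Int) = some c := by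
      have : ((r + 1 : Nat) : Int) - 1 = (r : Int) := by push_cast; ring
      rw [this, PySem.List.pyGet?_natCast, hcs]
    by_cases hp : some c = prev
    · -- same char as previous run: both sides skip
      rcases hprev with ⟨hr0, hpn, hall⟩ | ⟨hr1, hpg, p, hps, hpseen⟩
      · rw [hpn] at hp; exact (Option.some_ne_none c hp).elim
      have hc : c = p := by rw [hps] at hp; exact Option.some_inj.mp hp
      have hseenc : seen.contains c = true := hc ▸ hpseen
      have hregic : regi.contains c = true := (hregi c).trans hseenc
      have hgetprev : PySem.List.pyGet? cs ((r : Int) - 1) = some c := by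
        rw [hpg, hps, hc]
      rw [solutionLoop, hregic]
      simp only [Bool.not_true, Bool.false_eq_true, if_false, hgetprev, if_pos]
      rw [runKeys, if_pos hp]
      exact ih (r+1) prev alone seen regi hdrop' (Or.inr ⟨by omega, by rw [hget, hp], ⟨p, hps, hpseen⟩⟩) hregi
    · -- a new run starts with c
      rw [runKeys, if_neg hp]
      by_cases hs : seen.contains c = true
      · -- second (or later) run of c: alone.add c
        have hregic : regi.contains c = true := (hregi c).trans hs
        have hgetne : ¬ PySem.List.pyGet? cs ((r : Int) - 1) = some c := by
          rcases hprev with ⟨hr0, hpn, hall⟩ | ⟨hr1, hpg, p, hps, hpseen⟩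
          · exact absurd (hall c) (by rw [hs]; simp)
          · rw [hpg]; intro h; exact hp h.symm
        rw [solutionLoop, hregic]
        simp only [Bool.not_true, Bool.false_eq_true, if_false, if_neg hgetne]
        rw [bFold, if_pos hs]
        exact ih (r+1) (some c) (alone.add c) seen regi hdrop'
          (Or.inr ⟨by omega, hget, ⟨c, rfl, hs⟩⟩) hregi
      · -- first run of c: register
        have hregic : regi.contains c = false := (hregi c).trans (by simpa using hs)
        rw [solutionLoop, hregic]
        simp only [Bool.not_false, if_true]
        rw [bFold, if_neg hs]
        have hseenadd : (PySem.Set.add seen c).contains c = true := by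
          simp [PySem.Set.mem_add]
        have hregi' : ∀ x, (regi.insert c (r : Int)).contains x = (PySem.Set.add seen c).contains x := by
          intro x
          rw [PySem.Dict.contains_insert]
          by_cases hx : x = c
          · subst hx; simp
          · have hbeq : (x == c) = false := by simp [hx]
            rw [hbeq, Bool.false_or, hregi x]
            have hmemx : (x ∈ PySem.Set.add seen c) ↔ x ∈ seen := by
              simp [PySem.Set.mem_add, hx]
            by_cases hxm : x ∈ seen
            · have h1 : seen.contains x = true := by simpa using hxm
              have h2 : (PySem.Set.add seen c).contains x = true := by
                simpa using hmemx.mpr hxm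
              rw [h1, h2]
            · have h1 : seen.contains x = false := by simpa using hxm
              have h2 : (PySem.Set.add seen c).contains x = false := by
                simpa using (fun h => hxm (hmemx.mp h))
              rw [h1, h2]
        exact ih (r+1) (some c) alone (PySem.Set.add seen c) (regi.insert c (r : Int)) hdrop'
          (Or.inr ⟨by omega, hget, ⟨c, rfl, hseenadd⟩⟩) hregi'

theorem mem_bFold_alone (l : List Char) :
    ∀ (seen alone : PySem.Set Char) (x : Char),
      x ∈ (bFold l seen alone).2 ↔ x ∈ alone ∨ (x ∈ seen ∧ x ∈ l) ∨ 2 ≤ l.count x := by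
  induction l with
  | nil => intro seen alone x; simp [bFold]
  | cons c t ih =>
    intro seen alone x
    by_cases hs : seen.contains c = true
    · rw [bFold, if_pos hs, ih]
      by_cases hx : x = c
      · subst hx
        have hsc : x ∈ seen := by simpa using hs
        have hcnt : List.count x (x :: t) = List.count x t + 1 := by simp
        constructor
        · rintro (h | h | h)
          · rcases (PySem.Set.mem_add _ _ _).mp h with h' | h'
            · exact Or.inl h'
            · exact Or.inr (Or.inl ⟨hsc, List.mem_cons_self⟩)
          · exact Or.inr (Or.inl ⟨h.1, List.mem_cons_of_mem _ h.2⟩)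
          · exact Or.inr (Or.inr (by omega))
        · intro _
          exact Or.inl ((PySem.Set.mem_add _ _ _).mpr (Or.inr rfl))
      · have hcnt : List.count x (c :: t) = List.count x t := by rw [List.count_cons_of_ne (Ne.symm hx)]
        have hmc : (x ∈ c :: t) ↔ x ∈ t := by simp [List.mem_cons, hx]
        rw [show (x ∈ PySem.Set.add alone c) ↔ x ∈ alone from by
          simp [PySem.Set.mem_add, hx], hcnt, hmc]
    · rw [bFold, if_neg hs, ih]
      by_cases hx : x = c
      · subst hx
        have hxs : x ∉ seen := fun h => hs (by simpa using h)
        have hcnt : List.count x (x :: t) = List.count x t + 1 := by simp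
        constructor
        · rintro (h | h | h)
          · exact Or.inl h
          · rcases (PySem.Set.mem_add _ _ _).mp h.1 with h' | h'
            · exact absurd h' hxs
            · have hpos : 0 < List.count x t := List.count_pos_iff.mpr h.2
              exact Or.inr (Or.inr (by omega))
          · exact Or.inr (Or.inr (by omega))
        · rintro (h | h | h)
          · exact Or.inl h
          · exact absurd h.1 hxs
          · exact Or.inr (Or.inl ⟨(PySem.Set.mem_add _ _ _).mpr (Or.inr rfl),
              List.count_pos_iff.mp (by omega)⟩)
      · have hcnt : List.count x (c :: t) = List.count x t := by rw [List.count_cons_of_ne (Ne.symm hx)]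
        have hmc : (x ∈ c :: t) ↔ x ∈ t := by simp [List.mem_cons, hx]
        rw [show (x ∈ PySem.Set.add seen c) ↔ x ∈ seen from by
          simp [PySem.Set.mem_add, hx], hcnt, hmc]

theorem nodup_bFold_alone (l : List Char) :
    ∀ (seen alone : PySem.Set Char), alone.Nodup → (bFold l seen alone).2.Nodup := by
  induction l with
  | nil => intro seen alone h; exact h
  | cons c t ih =>
    intro seen alone h
    by_cases hs : seen.contains c = true
    · rw [bFold, if_pos hs]; exact ih _ _ (PySem.Set.nodup_add _ _ h)
    · rw [bFold, if_neg hs]; exact ih _ _ h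

-- the 'answer += i' loop is identity on its input list
theorem foldl_append_chars (l : List Char) :
    l.foldl (fun acc c => acc ++ [c]) ([] : List Char) = l := by
  simpa using PySem.List.foldl_append_singleton_eq_self (l := l) (acc := [])

-- ===== VERDICT (by name: the statement is the Claim_ definition above) =====
theorem solution_spec : Claim_equal_solution := by
  intro input_string _
  unfold Spec_solution solution solution_alt
  set cs := input_string.toList with hcs
  dsimp only
  have hkeys : (cs.foldl (fun (st : List Char × Option Char) c =>
      if some c ≠ st.2 then (st.1 ++ [c], some c) else st) ([], none)).1 = runKeys none cs := by
    simpa using keysFold_eq_runKeys cs [] none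
  simp only [hkeys]
  set ks := runKeys none cs with hks
  have hA : (solutionLoop cs 0 cs (PySem.Set.empty, PySem.Dict.empty)).1
      = (bFold ks PySem.Set.empty PySem.Set.empty).2 :=
    solutionLoop_eq_bFold cs cs 0 none PySem.Set.empty PySem.Set.empty PySem.Dict.empty
      (by simp) (Or.inl ⟨rfl, rfl, fun c => rfl⟩) (fun c => rfl)
  simp only [hA]
  have hruns : (ks.foldl (fun (d : PySem.Dict Char Int) c => d.modify c 0 (· + 1)) PySem.Dict.empty)
      = PySem.Dict.counter ks := rfl
  simp only [hruns]
  set aloneA := (bFold ks PySem.Set.empty PySem.Set.empty).2 with haA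
  set fB := (PySem.Dict.keys (PySem.Dict.counter ks)).filter
      (fun c => decide (1 < (PySem.Dict.counter ks).getD c 0)) with hfB
  have hmem : ∀ x, x ∈ aloneA ↔ x ∈ fB := by
    intro x
    rw [haA, mem_bFold_alone, hfB, List.mem_filter, PySem.Dict.keys_counter,
      PySem.Set.mem_ofList, PySem.Dict.getD_counter]
    simp only [PySem.Set.empty, List.not_mem_nil, false_and, false_or, decide_eq_true_eq]
    constructor
    · intro h
      have hc : 2 ≤ ks.count x := h
      exact ⟨List.count_pos_iff.mp (by omega), by omega⟩
    · intro ⟨_, h⟩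
      have h2 : (2 : Int) ≤ (ks.count x : Int) := by omega
      exact_mod_cast h2
  have hndA : aloneA.Nodup := nodup_bFold_alone ks _ _ List.nodup_nil
  have hndB : fB.Nodup := List.Nodup.filter _ (PySem.Dict.nodup_keys_counter ks)
  have hperm : aloneA.Perm fB := (List.perm_ext_iff_of_nodup hndA hndB).mpr hmem
  have hsorted : PySem.List.sorted aloneA (fun x => x) false
      = PySem.List.sorted fB (fun x => x) false :=
    PySem.List.sorted_eq_sorted_of_perm aloneA fB (fun x => x) (fun _ _ h => h) hperm
  by_cases hz : aloneA.length = 0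
  · have hA0 : aloneA = [] := List.length_eq_zero_iff.mp hz
    have hB0 : fB = [] := List.eq_nil_iff_forall_not_mem.mpr
      (fun x hx => by rw [hA0] at hmem; exact (List.not_mem_nil).elim ((hmem x).mpr hx))
    rw [if_pos hz, if_pos (by rw [hB0]; simp [PySem.List.sorted_eq_nil_iff])]
  · rw [if_neg hz]
    have hBne : ¬ PySem.List.sorted fB (fun x => x) false = [] := by
      rw [PySem.List.sorted_eq_nil_iff]
      intro h
      apply hz
      have hA0 : aloneA = [] := List.eq_nil_iff_forall_not_mem.mpr
        (fun x hx => by rw [h] at hmem; exact (List.not_mem_nil).elim ((hmem x).mp hx))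
      rw [hA0]; rfl
    rw [if_neg hBne, foldl_append_chars, hsorted]
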